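-- pv_equiv track=rewrite | github.com/hatuankhanh05/codeptit_python | SoLocPhatDep.py | isPretty
-- ===== SOURCE A (Python) =====
-- def isPretty(n):
--     i = 0
--     length = len(n)
--     while i < length:
--         if n[i:i + 3] == '688':
--             i += 3
--         elif n[i:i + 2] == '68':
--             i += 2
--         elif n[i] == '6':
--             i += 1
--         else:
--             break
--     return i >= length
-- ===== SOURCE B (Python) =====
-- def isPretty(n):
--     # single-pass DFA: a '6' starts a block, at most two '8's may follow it
--     seen6 = False
--     run = 0
--     for c in n:
--         if c == '6':
--             seen6 = True
--             run = 0
--         elif c == '8' and seen6 and run < 2: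
--             run += 1
--         else:
--             return False
--     return True
-- ===== Notes on version B (the rewrite author's own statement) =====
-- stated objective: alternative
-- what changed: Replaced the greedy longest-token (688/68/6) loop with index arithmetic and slicing by a single char-by-char DFA pass keeping (seen6, run-of-8s) state.
import Mathlib
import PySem

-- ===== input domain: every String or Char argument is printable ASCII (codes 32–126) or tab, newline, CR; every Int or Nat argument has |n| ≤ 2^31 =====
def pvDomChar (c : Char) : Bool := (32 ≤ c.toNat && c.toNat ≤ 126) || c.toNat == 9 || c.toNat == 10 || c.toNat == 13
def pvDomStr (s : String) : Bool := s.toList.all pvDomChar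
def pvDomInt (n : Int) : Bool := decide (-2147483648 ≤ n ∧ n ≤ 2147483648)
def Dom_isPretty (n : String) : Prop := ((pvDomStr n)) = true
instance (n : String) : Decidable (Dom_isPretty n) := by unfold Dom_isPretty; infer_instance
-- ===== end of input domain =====

-- B replaces A's greedy token loop (slices '688'/'68'/'6') by a one-state-pair DFA scan; alternative, same cost.


-- ===== PORT A =====
-- the while loop over index i, on the remaining suffix n[i:]; n[i:i+3] == '688' is take 3 = ['6','8','8'] etc.;
-- loop exit with i ≥ length is remaining = [] → true, break is → false
def isPrettyGo (l : List Char) : Bool :=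
  match l with
  | [] => true
  | c :: r =>
    if List.take 3 (c :: r) = ['6', '8', '8'] then isPrettyGo (List.drop 2 r)
    else if List.take 2 (c :: r) = ['6', '8'] then isPrettyGo (List.drop 1 r)
    else if c = '6' then isPrettyGo r
    else false
termination_by l.length
decreasing_by
  · simp
  · simp
  · simp

def isPretty (n : String) : Bool := isPrettyGo n.toList

-- ===== PORT B =====
-- the for-loop of Source B with state (seen6, run); early `return False` ends the recursion with false
def isPrettyAltGo (l : List Char) (seen6 : Bool) (run : Int) : Bool :=
  match l with
  | [] => true
  | c :: r =>
    if c = '6' then isPrettyAltGo r true 0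
    else if c = '8' && seen6 && decide (run < 2) then isPrettyAltGo r seen6 (run + 1)
    else false

def isPretty_alt (n : String) : Bool := isPrettyAltGo n.toList false 0

-- ===== PRECONDITION & SPEC =====
def Spec_isPretty (n : String) (out : Bool) : Prop := out = isPretty_alt n
instance (n : String) (out : Bool) : Decidable (Spec_isPretty n out) := by unfold Spec_isPretty; infer_instance

-- ===== CLAIM (what is proved, stated in full; the proofs are below) =====
def Claim_equal_isPretty : Prop := ∀ (n : String), Dom_isPretty n → Spec_isPretty n (isPretty n)

-- ===== LEMMAS AND PROOFS =====

-- after a completed '688' token the DFA state (b, k) with 2 ≤ k behaves like the fresh state (false, 0)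
lemma altGo_ge2 (l : List Char) (b : Bool) (k : Int) (hk : 2 ≤ k) :
    isPrettyAltGo l b k = isPrettyAltGo l false 0 := by
  cases l with
  | nil => rfl
  | cons c r =>
    by_cases h6 : c = '6'
    · simp [isPrettyAltGo, h6]
    · have h2 : ¬ (k < 2) := by omega
      simp [isPrettyAltGo, h6, h2]

-- if the next char is not '8', the DFA state is irrelevant
lemma altGo_not8 (l : List Char) (b : Bool) (k : Int) (h : l.head? ≠ some '8') :
    isPrettyAltGo l b k = isPrettyAltGo l false 0 := by
  cases l with
  | nil => rfl
  | cons c r =>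
    have hc : c ≠ '8' := by simpa using h
    by_cases h6 : c = '6'
    · simp [isPrettyAltGo, h6]
    · simp [isPrettyAltGo, h6, hc]

-- one-step evaluation lemmas for the two loops
lemma go_bad (c : Char) (r : List Char) (hc : c ≠ '6') : isPrettyGo (c :: r) = false := by
  rw [isPrettyGo]
  simp [List.take, hc]

lemma go_688 (r : List Char) : isPrettyGo ('6' :: '8' :: '8' :: r) = isPrettyGo r := by
  rw [isPrettyGo]
  simp [List.take]

lemma go_68 (e : Char) (r : List Char) (he : e ≠ '8') :
    isPrettyGo ('6' :: '8' :: e :: r) = isPrettyGo (e :: r) := by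
  rw [isPrettyGo]
  simp [List.take, he]

lemma go_6 (d : Char) (r : List Char) (hd : d ≠ '8') :
    isPrettyGo ('6' :: d :: r) = isPrettyGo (d :: r) := by
  rw [isPrettyGo]
  simp [List.take, hd]

lemma alt_6 (r : List Char) (b : Bool) (k : Int) :
    isPrettyAltGo ('6' :: r) b k = isPrettyAltGo r true 0 := by
  rw [isPrettyAltGo]
  simp

lemma alt_8 (r : List Char) (k : Int) (hk : k < 2) :
    isPrettyAltGo ('8' :: r) true k = isPrettyAltGo r true (k + 1) := by
  rw [isPrettyAltGo]
  simp [hk]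

lemma alt_bad (c : Char) (r : List Char) (k : Int) (hc : c ≠ '6') :
    isPrettyAltGo (c :: r) false k = false := by
  rw [isPrettyAltGo]
  simp [hc]

lemma go_eq_altGo (l : List Char) : isPrettyGo l = isPrettyAltGo l false 0 := by
  generalize hL : l.length = N
  induction N using Nat.strong_induction_on generalizing l with
  | _ N ih =>
    match l, hL with
    | [], _ => simp [isPrettyGo, isPrettyAltGo]
    | [c], hL =>
      by_cases hc : c = '6'
      · subst hc; simp [isPrettyGo, isPrettyAltGo, List.take]
      · rw [go_bad c [] hc, alt_bad c [] 0 hc]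
    | [c, d], hL =>
      by_cases hc : c = '6'
      · subst hc
        by_cases hd : d = '8'
        · subst hd; simp [isPrettyGo, isPrettyAltGo, List.take]
        · rw [go_6 d [] hd, alt_6, altGo_not8 [d] true 0 (by simpa using hd),
            ih 1 (by simp at hL; omega) [d] rfl]
      · rw [go_bad c [d] hc, alt_bad c [d] 0 hc]
    | c :: d :: e :: r3, hL =>
      by_cases hc : c = '6'
      · subst hc
        by_cases hd : d = '8'
        · subst hd
          by_cases he : e = '8'
          · subst he
            rw [go_688, alt_6, alt_8 _ 0 (by omega), alt_8 _ (0 + 1) (by omega),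
              altGo_ge2 r3 true (0 + 1 + 1) (by omega),
              ih r3.length (by simp at hL; omega) r3 rfl]
          · rw [go_68 e r3 he, alt_6, alt_8 _ 0 (by omega),
              altGo_not8 (e :: r3) true (0 + 1) (by simpa using he),
              ih (e :: r3).length (by simp at hL ⊢; omega) (e :: r3) rfl]
        · rw [go_6 d (e :: r3) hd, alt_6,
            altGo_not8 (d :: e :: r3) true 0 (by simpa using hd),
            ih (d :: e :: r3).length (by simp at hL ⊢; omega) (d :: e :: r3) rfl]
      · rw [go_bad c (d :: e :: r3) hc, alt_bad c (d :: e :: r3) 0 hc]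

-- ===== VERDICT (by name: the statement is the Claim_ definition above) =====
theorem isPretty_spec : Claim_equal_isPretty := by
  intro n _
  unfold Spec_isPretty isPretty isPretty_alt
  exact go_eq_altGo n.toList
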